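-- pv_equiv track=rewrite | github.com/brunohml/spes_transformer | for reference/src_backup/visualize_imputation.py | get_mask_segments
-- ===== SOURCE A (Python) =====
-- def get_mask_segments(mask):
--     """
--     Convert boolean mask array into list of (start_idx, length) tuples
--     for consecutive True values
--     """
--     segments = []
--     start = None
--
--     for i, val in enumerate(mask):
--         if val and start is None:  # Start of new masked segment
--             start = i
--         elif not val and start is not None:  # End of masked segment
--             segments.append((start, i - start))
--             start = None
--
--     # Handle case where mask ends with True
--     if start is not None:
--         segments.append((start, len(mask) - start))
--
--     return segments
-- ===== SOURCE B (Python) =====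
-- def get_mask_segments(mask):
--     """
--     Convert boolean mask array into list of (start_idx, length) tuples
--     for consecutive True values
--     """
--     segments = []
--     i = 0
--     n = len(mask)
--     while i < n:
--         j = i
--         while j < n and bool(mask[j]) == bool(mask[i]):
--             j += 1
--         if mask[i]:
--             segments.append((i, j - i))
--         i = j
--     return segments
-- ===== Notes on version B (the rewrite author's own statement) =====
-- stated objective: alternative
-- what changed: Replaced A's single element-by-element scan with a stateful start flag by a run-splitting two-pointer loop that consumes each maximal run of equal truthiness at once and emits (start, length) directly for True runs, with no carried Option state and no post-loop fix-up.
import Mathlib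
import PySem

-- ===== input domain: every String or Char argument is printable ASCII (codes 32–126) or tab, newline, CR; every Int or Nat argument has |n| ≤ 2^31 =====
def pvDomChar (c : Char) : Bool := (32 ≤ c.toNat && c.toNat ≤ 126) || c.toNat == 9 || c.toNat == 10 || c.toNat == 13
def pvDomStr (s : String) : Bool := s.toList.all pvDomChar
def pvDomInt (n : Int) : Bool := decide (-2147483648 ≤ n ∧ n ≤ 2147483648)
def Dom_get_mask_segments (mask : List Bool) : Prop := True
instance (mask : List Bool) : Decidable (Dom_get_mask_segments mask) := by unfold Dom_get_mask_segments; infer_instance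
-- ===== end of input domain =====

-- B replaces A's element-by-element scan with a carried Option start by a run-splitting
-- two-pointer loop consuming whole runs at once (objective: alternative; same cost).

-- ===== PORT A =====
-- loop body of A's `for i, val in enumerate(mask)`; state = (segments, start)
def pvAStep (st : List (Int × Int) × Option Int) (iv : Int × Bool) : List (Int × Int) × Option Int :=
  if iv.2 && st.2.isNone then (st.1, some iv.1)
  else if !iv.2 && st.2.isSome then (st.1 ++ [(st.2.getD 0, iv.1 - st.2.getD 0)], none)
  else st

def get_mask_segments (mask : List Bool) : List (Int × Int) :=
  let st := (PySem.List.enumerate mask).foldl pvAStep ([], none)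
  match st.2 with
  | some s => st.1 ++ [(s, (mask.length : Int) - s)]
  | none => st.1

-- ===== PORT B =====
-- Source B's outer while loop: each iteration consumes one maximal run of equal truthiness
-- (the inner `while j < n and bool(mask[j]) == bool(mask[i])` = takeWhile/dropWhile on the suffix).
def pvBGo (mask : List Bool) (i : Int) : List (Int × Int) :=
  match mask with
  | [] => []
  | b :: rest =>
    let len : Int := 1 + (rest.takeWhile (· == b)).length
    (if b then [(i, len)] else []) ++ pvBGo (rest.dropWhile (· == b)) (i + len)
termination_by mask.length
decreasing_by
  exact Nat.lt_succ_of_le (List.length_dropWhile_le _ _)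

def get_mask_segments_alt (mask : List Bool) : List (Int × Int) := pvBGo mask 0

-- ===== PRECONDITION & SPEC =====
def Spec_get_mask_segments (mask : List Bool) (out : List (Int × Int)) : Prop := out = get_mask_segments_alt mask
instance (mask : List Bool) (out : List (Int × Int)) : Decidable (Spec_get_mask_segments mask out) := by unfold Spec_get_mask_segments; infer_instance

-- ===== CLAIM (what is proved, stated in full; the proofs are below) =====
def Claim_equal_get_mask_segments : Prop := ∀ (mask : List Bool), Dom_get_mask_segments mask → Spec_get_mask_segments mask (get_mask_segments mask)

-- ===== LEMMAS AND PROOFS =====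

-- wrap-up after A's loop: append the still-open segment, if any
def pvFinish (st : List (Int × Int) × Option Int) (n : Int) : List (Int × Int) :=
  match st.2 with
  | some s => st.1 ++ [(s, n - s)]
  | none => st.1

theorem pvBGo_false_cons (rest : List Bool) (i : Int) :
    pvBGo (false :: rest) i = pvBGo rest (i + 1) := by
  match rest with
  | [] => simp [pvBGo]
  | true :: r => simp [pvBGo]
  | false :: r =>
    rw [pvBGo, pvBGo]
    simp only [List.takeWhile, List.dropWhile]
    norm_num
    ring_nf

theorem pvMain (mask : List Bool) : ∀ (i : Int) (segs : List (Int × Int)),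
    (pvFinish ((PySem.List.enumerate mask i).foldl pvAStep (segs, none)) (i + mask.length)
      = segs ++ pvBGo mask i)
    ∧ (∀ s : Int,
      pvFinish ((PySem.List.enumerate mask i).foldl pvAStep (segs, some s)) (i + mask.length)
        = segs ++ [(s, (i + (mask.takeWhile (· == true)).length) - s)]
            ++ pvBGo (mask.dropWhile (· == true)) (i + (mask.takeWhile (· == true)).length)) := by
  induction mask with
  | nil =>
    intro i segs
    constructor
    · simp [PySem.List.enumerate, pvFinish, pvBGo]
    · intro s; simp [PySem.List.enumerate, pvFinish, pvBGo]
  | cons b rest ih =>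
    intro i segs
    constructor
    · -- start = none
      rw [PySem.List.enumerate_cons]
      cases b with
      | true =>
        simp only [List.foldl_cons, pvAStep, Option.isNone_none, Bool.and_true]
        norm_num
        have h := (ih (i + 1) segs).2 i
        rw [pvBGo]
        simp only [if_pos]
        simp only [beq_true, List.append_assoc, List.cons_append, List.singleton_append,
          List.nil_append] at h ⊢
        ring_nf at h ⊢
        exact h
      | false =>
        simp only [List.foldl_cons, pvAStep]
        norm_num
        have h := (ih (i + 1) segs).1
        rw [pvBGo_false_cons]
        push_cast at h ⊢
        ring_nf at h ⊢
        exact h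
    · -- start = some s
      intro s
      rw [PySem.List.enumerate_cons]
      cases b with
      | true =>
        simp only [List.foldl_cons, pvAStep]
        norm_num
        have h := (ih (i + 1) segs).2 s
        simp only [List.takeWhile, List.dropWhile, beq_true, List.append_assoc,
          List.cons_append, List.singleton_append, List.nil_append] at h ⊢
        norm_num
        push_cast at h ⊢
        ring_nf at h ⊢
        exact h
      | false =>
        simp only [List.foldl_cons, pvAStep]
        norm_num
        have h := (ih (i + 1) (segs ++ [(s, i - s)])).1
        rw [pvBGo_false_cons]
        simp only [List.takeWhile, List.dropWhile, beq_true, List.append_assoc,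
          List.cons_append, List.singleton_append, List.nil_append] at h ⊢
        norm_num
        push_cast at h ⊢
        ring_nf at h ⊢
        exact h

-- ===== VERDICT (by name: the statement is the Claim_ definition above) =====
theorem get_mask_segments_spec : Claim_equal_get_mask_segments := by
  intro mask _
  unfold Spec_get_mask_segments get_mask_segments get_mask_segments_alt
  have h := (pvMain mask 0 []).1
  simp only [zero_add, List.nil_append] at h
  rw [← h]
  rfl
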